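-- pv_equiv track=rewrite | github.com/itsreborn2/intellio | backend/stockeasy/agents/fallback_response.py | _get_fallback_reason
-- ===== SOURCE A (Python) =====
-- from typing import Dict, Any, List, Optional
--
-- def _get_fallback_reason(error_types: List[str]) -> str:
--     """
--     Fallback 이유 결정
--
--     Args:
--         error_types: 식별된 오류 유형 목록
--
--     Returns:
--         Fallback 이유
--     """
--     if any(et.startswith("question_analyzer") for et in error_types):
--         return "질문 분석 실패"
--     elif "data_not_found" in error_types:
--         return "관련 정보 없음"
--     elif "api_error" in error_types:
--         return "외부 서비스 오류"
--     elif any(et.endswith("retriever_error") for et in error_types):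
--         return "데이터 검색 실패"
--     elif "summarizer_error" in error_types:
--         return "요약 생성 실패"
--     else:
--         return "기타 처리 오류"
-- ===== SOURCE B (Python) =====
-- def _get_fallback_reason(error_types):
--     qa = dnf = api = ret = summ = False
--     for et in error_types:
--         qa = qa or et.startswith("question_analyzer")
--         dnf = dnf or et == "data_not_found"
--         api = api or et == "api_error"
--         ret = ret or et.endswith("retriever_error")
--         summ = summ or et == "summarizer_error"
--     if qa:
--         return "질문 분석 실패"
--     elif dnf:
--         return "관련 정보 없음"
--     elif api:
--         return "외부 서비스 오류"
--     elif ret: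
--         return "데이터 검색 실패"
--     elif summ:
--         return "요약 생성 실패"
--     else:
--         return "기타 처리 오류"
-- ===== Notes on version B (the rewrite author's own statement) =====
-- stated objective: alternative
-- what changed: Replaces A's five separate short-circuited scans of error_types with a single pass that accumulates five boolean flags, followed by one priority if/elif chain on the flags.
import Mathlib
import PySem

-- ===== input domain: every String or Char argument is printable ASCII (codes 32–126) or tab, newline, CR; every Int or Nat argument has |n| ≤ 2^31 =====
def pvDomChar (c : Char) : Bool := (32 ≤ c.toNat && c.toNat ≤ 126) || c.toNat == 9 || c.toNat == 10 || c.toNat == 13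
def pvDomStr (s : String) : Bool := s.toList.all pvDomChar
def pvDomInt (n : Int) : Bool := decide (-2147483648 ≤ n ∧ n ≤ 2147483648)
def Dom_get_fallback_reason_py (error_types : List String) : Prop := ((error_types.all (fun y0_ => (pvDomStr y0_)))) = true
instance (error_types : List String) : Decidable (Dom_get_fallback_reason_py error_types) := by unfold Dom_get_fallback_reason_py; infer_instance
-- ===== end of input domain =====

-- ===== PORT A =====
def get_fallback_reason_py (error_types : List String) : String :=
  if error_types.any (fun et => PySem.Str.startswith et "question_analyzer") then "질문 분석 실패"
  else if error_types.contains "data_not_found" then "관련 정보 없음"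
  else if error_types.contains "api_error" then "외부 서비스 오류"
  else if error_types.any (fun et => PySem.Str.endswith et "retriever_error") then "데이터 검색 실패"
  else if error_types.contains "summarizer_error" then "요약 생성 실패"
  else "기타 처리 오류"

-- ===== PORT B =====
def get_fallback_reason_py_alt (error_types : List String) : String :=
  let fl := error_types.foldl
    (fun (st : Bool × Bool × Bool × Bool × Bool) et =>
      (st.1 || PySem.Str.startswith et "question_analyzer",
       st.2.1 || et == "data_not_found",
       st.2.2.1 || et == "api_error",
       st.2.2.2.1 || PySem.Str.endswith et "retriever_error",
       st.2.2.2.2 || et == "summarizer_error"))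
    (false, false, false, false, false)
  if fl.1 then "질문 분석 실패"
  else if fl.2.1 then "관련 정보 없음"
  else if fl.2.2.1 then "외부 서비스 오류"
  else if fl.2.2.2.1 then "데이터 검색 실패"
  else if fl.2.2.2.2 then "요약 생성 실패"
  else "기타 처리 오류"

-- ===== PRECONDITION & SPEC =====
def Spec_get_fallback_reason_py (error_types : List String) (out : String) : Prop := out = get_fallback_reason_py_alt error_types
instance (error_types : List String) (out : String) : Decidable (Spec_get_fallback_reason_py error_types out) := by unfold Spec_get_fallback_reason_py; infer_instance

-- ===== CLAIM (what is proved, stated in full; the proofs are below) =====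
def Claim_equal_get_fallback_reason_py : Prop := ∀ (error_types : List String), Dom_get_fallback_reason_py error_types → Spec_get_fallback_reason_py error_types (get_fallback_reason_py error_types)

-- ===== LEMMAS AND PROOFS =====
-- The fold accumulates each flag as an 'or' of the per-element tests.
theorem pv_fold_flags (l : List String) (a b c d e : Bool) :
    l.foldl
      (fun (st : Bool × Bool × Bool × Bool × Bool) et =>
        (st.1 || PySem.Str.startswith et "question_analyzer",
         st.2.1 || et == "data_not_found",
         st.2.2.1 || et == "api_error",
         st.2.2.2.1 || PySem.Str.endswith et "retriever_error",
         st.2.2.2.2 || et == "summarizer_error"))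
      (a, b, c, d, e)
    = (a || l.any (fun et => PySem.Str.startswith et "question_analyzer"),
       b || l.contains "data_not_found",
       c || l.contains "api_error",
       d || l.any (fun et => PySem.Str.endswith et "retriever_error"),
       e || l.contains "summarizer_error") := by
  induction l generalizing a b c d e with
  | nil => simp
  | cons x xs ih =>
      simp only [List.foldl_cons, List.any_cons, List.contains_cons, ih]
      simp [Bool.or_assoc, BEq.comm]


-- ===== VERDICT (by name: the statement is the Claim_ definition above) =====
theorem get_fallback_reason_py_spec : Claim_equal_get_fallback_reason_py := by
  intro error_types _
  unfold Spec_get_fallback_reason_py get_fallback_reason_py get_fallback_reason_py_alt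
  simp only [pv_fold_flags, Bool.false_or]
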